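-- pv_equiv track=rewrite | github.com/lifelonglearnerit/python_workout | exercise_7_ubbi_dubbi.py | ubbi_dubbi_2
-- ===== SOURCE A (Python) =====
-- def ubbi_dubbi_2(word):
--     output = []
--     for letter in word:
--         if letter in 'aeiou':
--             output.append(f'ub{letter}')
--         else:
--             output.append(letter)
--     return ''.join(output)
-- ===== SOURCE B (Python) =====
-- def ubbi_dubbi_2(word):
--     # Jump from vowel to vowel with str.find and copy consonant runs as slices,
--     # instead of examining every character one by one.
--     pieces = []
--     rest = word
--     while True:
--         positions = [p for p in (rest.find(v) for v in 'aeiou') if p != -1]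
--         if not positions:
--             pieces.append(rest)
--             return ''.join(pieces)
--         p = min(positions)
--         pieces.append(rest[:p])
--         pieces.append('ub')
--         pieces.append(rest[p])
--         rest = rest[p + 1:]
-- ===== Notes on version B (the rewrite author's own statement) =====
-- stated objective: alternative
-- what changed: Instead of examining every character with a branch and an accumulator, B repeatedly locates the next vowel via str.find (minimum over the five per-vowel finds), copies the whole consonant run before it as one slice, emits the marker plus the vowel, and continues on the tail slice.
import Mathlib
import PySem

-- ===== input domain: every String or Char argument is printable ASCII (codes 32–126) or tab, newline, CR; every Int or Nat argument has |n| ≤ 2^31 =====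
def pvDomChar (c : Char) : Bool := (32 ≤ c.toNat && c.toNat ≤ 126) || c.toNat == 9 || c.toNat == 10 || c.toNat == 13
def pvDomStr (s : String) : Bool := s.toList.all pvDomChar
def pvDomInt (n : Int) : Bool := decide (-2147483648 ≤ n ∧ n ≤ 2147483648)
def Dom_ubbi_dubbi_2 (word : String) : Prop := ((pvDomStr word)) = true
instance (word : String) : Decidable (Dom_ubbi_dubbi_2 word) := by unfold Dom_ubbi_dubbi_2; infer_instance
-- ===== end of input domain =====

-- B replaces A's per-character loop by vowel-to-vowel jumps: it finds the next vowel with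
-- str.find, copies the consonant run before it as one slice, and continues on the tail slice.

-- ===== PORT A =====
-- the loop: for each letter, append 'ub'+letter if it is a vowel, else the letter itself; join at the end
def ubbi_dubbi_2 (word : String) : String :=
  let output : List String :=
    word.toList.foldl
      (fun out letter =>
        if letter ∈ ['a', 'e', 'i', 'o', 'u'] then  -- `letter in 'aeiou'`: single-char membership
          out ++ [String.ofList ['u', 'b', letter]]      -- f'ub{letter}'
        else
          out ++ [String.ofList [letter]])
      []
  PySem.Str.join "" output

-- ===== PORT B =====
-- the `while True` loop of Source B, as fuel recursion (fuel = len(word)+1 always suffices: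
-- each iteration drops at least one character of `rest`; the fuel-0 branch is unreachable)
def pvBLoop : Nat → List (List Char) → List Char → List Char
  | 0, pieces, _ => PySem.Chars.join [] pieces
  | fuel + 1, pieces, rest =>
    -- positions = [p for p in (rest.find(v) for v in 'aeiou') if p != -1]
    let positions :=
      (['a', 'e', 'i', 'o', 'u'].map (fun v => PySem.Chars.find rest [v])).filter (fun p => p ≠ -1)
    match positions with
    | [] => PySem.Chars.join [] (pieces ++ [rest])          -- pieces.append(rest); return ''.join(pieces)
    | q :: qs =>
      let p := qs.foldl min q                               -- p = min(positions)
      let run := PySem.List.slice rest none (some p)        -- rest[:p]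
      let vch := match PySem.List.pyGet? rest p with        -- rest[p] (in range: p is a find result ≠ -1)
        | some c => [c]
        | none => []
      pvBLoop fuel (pieces ++ [run, ['u', 'b'], vch]) (PySem.List.slice rest (some (p + 1)) none)

def ubbi_dubbi_2_alt (word : String) : String :=
  String.ofList (pvBLoop (word.toList.length + 1) [] word.toList)

-- ===== PRECONDITION & SPEC =====
def Spec_ubbi_dubbi_2 (word : String) (out : String) : Prop := out = ubbi_dubbi_2_alt word
instance (word : String) (out : String) : Decidable (Spec_ubbi_dubbi_2 word out) := by unfold Spec_ubbi_dubbi_2; infer_instance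

-- ===== CLAIM (what is proved, stated in full; the proofs are below) =====
def Claim_equal_ubbi_dubbi_2 : Prop := ∀ (word : String), Dom_ubbi_dubbi_2 word → Spec_ubbi_dubbi_2 word (ubbi_dubbi_2 word)

-- ===== LEMMAS AND PROOFS =====

-- the per-character effect both programs realise
def pvStep (c : Char) : List Char :=
  if c ∈ ['a', 'e', 'i', 'o', 'u'] then ['u', 'b', c] else [c]

lemma join_nilsep (xss : List (List Char)) : PySem.Chars.join [] xss = xss.flatten := by
  show List.intercalate [] xss = xss.flatten
  induction xss with
  | nil => rfl
  | cons a t ih =>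
    cases t with
    | nil => simp [List.intercalate]
    | cons b u =>
      simp only [List.intercalate] at *
      simp_all [List.intersperse]

-- A's foldl accumulates exactly the mapped pieces
lemma a_foldl (cs : List Char) (acc : List String) :
    cs.foldl
      (fun out letter =>
        if letter ∈ ['a', 'e', 'i', 'o', 'u'] then
          out ++ [String.ofList ['u', 'b', letter]]
        else
          out ++ [String.ofList [letter]]) acc
    = acc ++ cs.map (fun letter => String.ofList (pvStep letter)) := by
  induction cs generalizing acc with
  | nil => simp
  | cons c t ih =>
    simp only [List.foldl_cons, List.map_cons, ih]
    by_cases h : c ∈ ['a', 'e', 'i', 'o', 'u'] <;> simp [h, pvStep]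

lemma a_eq_flatMap (word : String) :
    ubbi_dubbi_2 word = String.ofList (word.toList.flatMap pvStep) := by
  unfold ubbi_dubbi_2
  have hj : ∀ (parts : List String),
      PySem.Str.join "" parts = String.ofList (PySem.Chars.join [] (parts.map String.toList)) := by
    intro parts
    conv_lhs => rw [← String.ofList_toList (s := PySem.Str.join "" parts)]
    rw [PySem.Str.toList_join]
    rfl
  rw [a_foldl, List.nil_append, hj, List.map_map]
  have hmap : word.toList.map (String.toList ∘ fun letter => String.ofList (pvStep letter))
      = word.toList.map pvStep := by
    apply List.map_congr_left
    intro c _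
    simp [Function.comp, String.toList_ofList]
  rw [hmap, join_nilsep, ← List.flatMap_def]

-- a singleton prefix of a drop is exactly an indexed element
lemma singleton_prefix_iff (v : Char) (l : List Char) (n : Nat) :
    [v] <+: l.drop n ↔ l[n]? = some v := by
  constructor
  · rintro ⟨t, ht⟩
    have h : (l.drop n).head? = some v := by rw [← ht]; rfl
    rw [List.head?_drop] at h
    exact h
  · intro h
    have h2 : (l.drop n).head? = some v := by rw [List.head?_drop]; exact h
    cases hd : l.drop n with
    | nil => simp [hd] at h2
    | cons a t =>
      rw [hd] at h2
      simp at h2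
      exact ⟨t, by simp [h2]⟩

-- a one-character infix is membership
lemma singleton_infix_iff (v : Char) (l : List Char) : [v] <:+: l ↔ v ∈ l := by
  constructor
  · intro h
    exact List.singleton_sublist.mp h.sublist
  · intro h
    obtain ⟨s, t, rfl⟩ := List.append_of_mem h
    exact ⟨s, t, by simp⟩

-- on vowel-free characters pvStep is the identity
lemma flatMap_id_of (l : List Char) (h : ∀ c ∈ l, pvStep c = [c]) : l.flatMap pvStep = l := by
  induction l with
  | nil => rfl
  | cons c t ih =>
    rw [List.flatMap_cons, h c (by simp), ih (fun x hx => h x (by simp [hx]))]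
    rfl

-- B's loop computes the flatMap, given enough fuel
lemma bLoop_eq (fuel : Nat) : ∀ (rest : List Char) (pieces : List (List Char)),
    rest.length ≤ fuel →
    pvBLoop fuel pieces rest = pieces.flatten ++ rest.flatMap pvStep := by
  induction fuel with
  | zero =>
    intro rest pieces hlen
    have hnil : rest = [] := List.eq_nil_of_length_eq_zero (by omega)
    subst hnil
    simp [pvBLoop, join_nilsep]
  | succ fuel ih =>
    intro rest pieces hlen
    simp only [pvBLoop]
    split
    · next heq =>
      -- no vowel occurs in rest
      have hnov : ∀ c ∈ rest, pvStep c = [c] := by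
        intro c hc
        unfold pvStep
        rw [if_neg]
        intro hcv
        have hmem : PySem.Chars.find rest [c] ∈
            (['a', 'e', 'i', 'o', 'u'].map (fun v => PySem.Chars.find rest [v])) :=
          List.mem_map.mpr ⟨c, hcv, rfl⟩
        have hall := List.filter_eq_nil_iff.mp heq _ hmem
        have hfc : PySem.Chars.find rest [c] = -1 := by simpa using hall
        exact ((PySem.Chars.find_eq_neg_one_iff rest [c]).mp hfc) ((singleton_infix_iff c rest).mpr hc)
      rw [join_nilsep, List.flatten_append, flatMap_id_of rest hnov]
      simp
    · next q qs heq =>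
      -- every position is a find result of some vowel, and is not -1
      have hq_mem : ∀ x ∈ q :: qs,
          x ≠ -1 ∧ ∃ v ∈ (['a', 'e', 'i', 'o', 'u'] : List Char), x = PySem.Chars.find rest [v] := by
        intro x hx
        rw [← heq] at hx
        have h1 := List.of_mem_filter hx
        have h2 := List.mem_of_mem_filter hx
        obtain ⟨v, hv, hveq⟩ := List.mem_map.mp h2
        exact ⟨by simpa using h1, v, hv, hveq.symm⟩
      have hpmem : qs.foldl min q ∈ q :: qs := by
        rcases PySem.List.foldl_min_mem qs q with h | h
        · rw [h]; exact List.mem_cons_self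
        · exact List.mem_cons_of_mem _ h
      have hple : ∀ x ∈ q :: qs, qs.foldl min q ≤ x := by
        intro x hx
        rcases List.mem_cons.mp hx with rfl | hx
        · exact (PySem.List.foldl_min_le qs x).1
        · exact (PySem.List.foldl_min_le qs q).2 x hx
      obtain ⟨hpne, v, hv, hpv⟩ := hq_mem _ hpmem
      have hp0 : 0 ≤ qs.foldl min q := by
        have h1 := PySem.Chars.neg_one_le_find rest [v]
        rw [← hpv] at h1
        omega
      have hpn : qs.foldl min q = ((qs.foldl min q).toNat : Int) := (Int.toNat_of_nonneg hp0).symm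
      have hspec := PySem.Chars.find_spec (s := rest) (sub := [v]) (by rw [← hpv]; exact hp0)
      rw [← hpv] at hspec
      obtain ⟨hpref, hminf⟩ := hspec
      have hvn : rest[(qs.foldl min q).toNat]? = some v := (singleton_prefix_iff v rest _).mp hpref
      have hnlt : (qs.foldl min q).toNat < rest.length := (List.getElem?_eq_some_iff.mp hvn).1
      -- the run before the vowel is vowel-free
      have htake : ∀ c ∈ rest.take (qs.foldl min q).toNat, pvStep c = [c] := by
        intro c hc
        obtain ⟨i, hi, hgi⟩ := List.getElem_of_mem hc
        have hi' : i < (qs.foldl min q).toNat := by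
          have := List.length_take_le (qs.foldl min q).toNat rest
          simp [List.length_take] at hi
          omega
        have hci : rest[i]? = some c := by
          rw [List.getElem?_eq_getElem (by omega : i < rest.length)]
          rw [← hgi, List.getElem_take]
        unfold pvStep
        rw [if_neg]
        intro hcv
        have hinf : [c] <+: rest.drop i := (singleton_prefix_iff c rest i).mpr hci
        have hfi : PySem.Chars.find rest [c] ≠ -1 := by
          rw [PySem.Chars.find_ne_neg_one_iff rest [c]]
          exact (singleton_infix_iff c rest).mpr (List.mem_of_mem_take hc)
        have hfpos : PySem.Chars.find rest [c] ∈ q :: qs := by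
          rw [← heq]
          refine List.mem_filter.mpr ⟨List.mem_map.mpr ⟨c, hcv, rfl⟩, by simpa using hfi⟩
        have hle2 := hple _ hfpos
        have hf0 : 0 ≤ PySem.Chars.find rest [c] := by
          have := PySem.Chars.neg_one_le_find rest [c]
          omega
        have hcspec := PySem.Chars.find_spec (s := rest) (sub := [c]) hf0
        have hti : (PySem.Chars.find rest [c]).toNat ≤ i := by
          by_contra hlt
          exact (hcspec.2 i (by omega)) hinf
        omega
      -- evaluate the three PySem primitives
      have hrun : PySem.List.slice rest none (some (qs.foldl min q)) = rest.take (qs.foldl min q).toNat :=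
        PySem.List.slice_to rest hp0
      have hget : PySem.List.pyGet? rest (qs.foldl min q) = some v := by
        rw [hpn, PySem.List.pyGet?_natCast]
        exact hvn
      have hdrop : PySem.List.slice rest (some (qs.foldl min q + 1)) none
          = rest.drop ((qs.foldl min q).toNat + 1) := by
        rw [PySem.List.slice_from rest (by omega : (0:Int) ≤ qs.foldl min q + 1)]
        congr 1
        omega
      rw [hrun, hget, hdrop, ih _ _ (by simp; omega)]
      -- reassemble rest around the found vowel
      have hsplit : rest = rest.take (qs.foldl min q).toNat
          ++ v :: rest.drop ((qs.foldl min q).toNat + 1) := by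
        conv_lhs => rw [← List.take_append_drop (qs.foldl min q).toNat rest]
        congr 1
        rw [List.drop_eq_getElem_cons hnlt]
        have : rest[(qs.foldl min q).toNat] = v := (List.getElem?_eq_some_iff.mp hvn).2
        rw [this]
      conv_rhs => rw [hsplit]
      rw [List.flatMap_append, List.flatMap_cons, flatMap_id_of _ htake]
      simp [pvStep, hv, List.flatten_append, List.append_assoc]

-- ===== VERDICT (by name: the statement is the Claim_ definition above) =====
theorem ubbi_dubbi_2_spec : Claim_equal_ubbi_dubbi_2 := by
  intro word _
  show ubbi_dubbi_2 word = ubbi_dubbi_2_alt word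
  rw [a_eq_flatMap, ubbi_dubbi_2_alt, bLoop_eq _ _ _ (by omega)]
  rfl
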